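-- pv_equiv track=rewrite | github.com/HShekhar79/Autorev-MCP | backend/engines/function_analysis_engine/function_analysis_engine.py | resolve_unknown_behaviour
-- ===== SOURCE A (Python) =====
-- from typing import List, Dict, Any, Optional
--
-- SYSTEM_RUNTIME_PREFIX = (
--     "__", "_", "crt", "mingw", "gcc", "atexit", "exit", "abort"
-- )
--
-- REGISTER_CALLS = {"rax", "rbx", "rcx", "rdx", "r8", "r9"}
--
-- def resolve_unknown_behaviour(function_name: str, calls: List[str]) -> str:
--     """Returns a single benign fallback behaviour name."""
--     if not calls:
--         return "no_external_activity"
--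
--     if any(function_name.startswith(p) for p in SYSTEM_RUNTIME_PREFIX):
--         return "system_runtime_function"
--
--     internal_calls = [c for c in calls if c.startswith(("sym.", "fcn.", "sub.", "entry"))]
--     if len(internal_calls) == len(calls):
--         return "internal_function_calls"
--
--     if any(c.lower() in REGISTER_CALLS for c in calls):
--         return "indirect_call_execution"
--
--     return "unknown_external_activity"
-- ===== SOURCE B (Python) =====
-- from typing import List
--
-- SYSTEM_RUNTIME_PREFIX = (
--     "__", "_", "crt", "mingw", "gcc", "atexit", "exit", "abort"
-- )
--
-- REGISTER_CALLS = {"rax", "rbx", "rcx", "rdx", "r8", "r9"}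
--
-- def resolve_unknown_behaviour(function_name: str, calls: List[str]) -> str:
--     """Returns a single benign fallback behaviour name."""
--     if not calls:
--         return "no_external_activity"
--
--     if function_name.startswith(SYSTEM_RUNTIME_PREFIX):
--         return "system_runtime_function"
--
--     # One pass with early exit: a register-style call can never carry an
--     # internal prefix, so seeing one already decides the verdict.
--     saw_external = False
--     for c in calls:
--         if c.lower() in REGISTER_CALLS:
--             return "indirect_call_execution"
--         if not c.startswith(("sym.", "fcn.", "sub.", "entry")):
--             saw_external = True
--
--     return "unknown_external_activity" if saw_external else "internal_function_calls"
-- ===== Notes on version B (the rewrite author's own statement) =====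
-- stated objective: simpler
-- what changed: Replaces A's three scans (filter-and-count of internal calls plus a separate any-register scan) with a single pass that early-returns on the first register-style call (valid because a register name can never carry an internal prefix) and otherwise tracks one boolean flag.
import Mathlib
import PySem

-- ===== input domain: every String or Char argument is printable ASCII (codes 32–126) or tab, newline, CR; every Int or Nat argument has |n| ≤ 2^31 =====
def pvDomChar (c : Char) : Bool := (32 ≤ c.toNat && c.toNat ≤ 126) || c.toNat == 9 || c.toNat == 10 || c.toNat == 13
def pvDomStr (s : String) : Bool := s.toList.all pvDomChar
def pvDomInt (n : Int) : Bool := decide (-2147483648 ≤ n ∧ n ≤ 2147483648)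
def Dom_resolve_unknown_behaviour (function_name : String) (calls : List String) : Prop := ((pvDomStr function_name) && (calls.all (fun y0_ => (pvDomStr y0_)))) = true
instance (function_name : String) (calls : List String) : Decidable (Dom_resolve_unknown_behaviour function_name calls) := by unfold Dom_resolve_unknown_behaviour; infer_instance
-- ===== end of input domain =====

-- B: one pass over calls with an early return on the first register-style call,
-- replacing A's filter-count scan plus separate any-register scan (objective: simpler).


-- shared module constants (same-module context of both Pythons)
def SYSTEM_RUNTIME_PREFIX : List String := ["__", "_", "crt", "mingw", "gcc", "atexit", "exit", "abort"]
def REGISTER_CALLS : PySem.Set String := PySem.Set.ofList ["rax", "rbx", "rcx", "rdx", "r8", "r9"]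
def INTERNAL_PREFIXES : List String := ["sym.", "fcn.", "sub.", "entry"]

-- ===== PORT A =====
def resolve_unknown_behaviour (function_name : String) (calls : List String) : String :=
  if calls = [] then "no_external_activity"
  else if SYSTEM_RUNTIME_PREFIX.any (fun p => PySem.Str.startswith function_name p) then
    "system_runtime_function"
  else
    -- internal_calls comprehension, its length compared to len(calls)
    if (calls.filter (fun c => INTERNAL_PREFIXES.any (fun p => PySem.Str.startswith c p))).length = calls.length then "internal_function_calls"
    else if calls.any (fun c => REGISTER_CALLS.contains (PySem.Str.lower c)) then
      "indirect_call_execution"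
    else "unknown_external_activity"

-- ===== PORT B =====
-- the for-loop of Source B: early return on a register call, otherwise carries the saw_external flag
def pvAltLoop (calls : List String) (saw_external : Bool) : String :=
  match calls with
  | [] => if saw_external then "unknown_external_activity" else "internal_function_calls"
  | c :: rest =>
    if REGISTER_CALLS.contains (PySem.Str.lower c) then "indirect_call_execution"
    else pvAltLoop rest (saw_external || !(INTERNAL_PREFIXES.any (fun p => PySem.Str.startswith c p)))

def resolve_unknown_behaviour_alt (function_name : String) (calls : List String) : String :=
  if calls = [] then "no_external_activity"
  else if SYSTEM_RUNTIME_PREFIX.any (fun p => PySem.Str.startswith function_name p) then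
    "system_runtime_function"
  else pvAltLoop calls false

-- ===== PRECONDITION & SPEC =====
def Spec_resolve_unknown_behaviour (function_name : String) (calls : List String) (out : String) : Prop := out = resolve_unknown_behaviour_alt function_name calls
instance (function_name : String) (calls : List String) (out : String) : Decidable (Spec_resolve_unknown_behaviour function_name calls out) := by unfold Spec_resolve_unknown_behaviour; infer_instance

-- ===== CLAIM (what is proved, stated in full; the proofs are below) =====
def Claim_equal_resolve_unknown_behaviour : Prop := ∀ (function_name : String) (calls : List String), Dom_resolve_unknown_behaviour function_name calls → Spec_resolve_unknown_behaviour function_name calls (resolve_unknown_behaviour function_name calls)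

-- ===== LEMMAS AND PROOFS =====

-- a register-style call (length ≤ 3) can never start with an internal prefix (length ≥ 4)
theorem pv_reg_not_internal (c : String)
    (h : REGISTER_CALLS.contains (PySem.Str.lower c) = true) :
    INTERNAL_PREFIXES.any (fun p => PySem.Str.startswith c p) = false := by
  have hlen : c.toList.length ≤ 3 := by
    have hmem : PySem.Str.lower c ∈ REGISTER_CALLS := by
      simpa [PySem.Set.contains] using h
    have hall : ∀ x ∈ REGISTER_CALLS, x.toList.length ≤ 3 := by decide
    have hL : (PySem.Str.lower c).toList.length = c.toList.length := by
      simp [PySem.Str.toList_lower, PySem.Chars.lower]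
    exact hL ▸ hall _ hmem
  rw [List.any_eq_false]
  intro p hp
  simp only [PySem.Str.startswith_eq]
  intro hcon
  have hpre := (PySem.Chars.startswith_iff _ _).mp hcon
  have hle := hpre.length_le
  have hp4 : 4 ≤ p.toList.length := by
    simp only [INTERNAL_PREFIXES, List.mem_cons, List.not_mem_nil, or_false] at hp
    rcases hp with h' | h' | h' | h' <;> rw [h'] <;> decide
  omega

-- characterisation of Source B's loop
theorem pvAltLoop_spec (calls : List String) (ext : Bool) :
    pvAltLoop calls ext =
      if calls.any (fun c => REGISTER_CALLS.contains (PySem.Str.lower c)) then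
        "indirect_call_execution"
      else if ext || calls.any (fun c => !(INTERNAL_PREFIXES.any (fun p => PySem.Str.startswith c p))) then
        "unknown_external_activity"
      else "internal_function_calls" := by
  induction calls generalizing ext with
  | nil => simp [pvAltLoop]
  | cons c rest ih =>
    simp only [pvAltLoop, List.any_cons]
    cases hr : REGISTER_CALLS.contains (PySem.Str.lower c) with
    | true => rfl
    | false =>
      simp only [Bool.false_or, Bool.false_eq_true, if_false]
      rw [ih, Bool.or_assoc]
      rfl

-- ===== VERDICT (by name: the statement is the Claim_ definition above) =====
theorem resolve_unknown_behaviour_spec : Claim_equal_resolve_unknown_behaviour := by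
  intro fn calls _
  unfold Spec_resolve_unknown_behaviour resolve_unknown_behaviour resolve_unknown_behaviour_alt
  by_cases h0 : calls = []
  · rw [if_pos h0, if_pos h0]
  · rw [if_neg h0, if_neg h0]
    cases h1 : SYSTEM_RUNTIME_PREFIX.any (fun p => PySem.Str.startswith fn p) with
    | true => rfl
    | false =>
      simp only [Bool.false_eq_true, if_false]
      rw [pvAltLoop_spec, Bool.false_or]
      by_cases hall : (calls.filter (fun c => INTERNAL_PREFIXES.any (fun p => PySem.Str.startswith c p))).length = calls.length
      · have hint : ∀ a ∈ calls, (INTERNAL_PREFIXES.any (fun p => PySem.Str.startswith a p)) = true := by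
          rw [List.length_filter_eq_length_iff] at hall
          exact hall
        have hnr : calls.any (fun c => REGISTER_CALLS.contains (PySem.Str.lower c)) = false := by
          rw [List.any_eq_false]
          intro c hc hcontra
          have hni := pv_reg_not_internal c hcontra
          rw [hint c hc] at hni
          exact absurd hni (by decide)
        have hne : calls.any (fun c => !(INTERNAL_PREFIXES.any (fun p => PySem.Str.startswith c p))) = false := by
          rw [List.any_eq_false]
          intro c hc hx
          rw [hint c hc] at hx
          exact absurd hx (by decide)
        rw [if_pos hall, if_neg (by rw [hnr]; decide), if_neg (by rw [hne]; simp)]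
      · have hne : calls.any (fun c => !(INTERNAL_PREFIXES.any (fun p => PySem.Str.startswith c p))) = true := by
          rw [List.any_eq_true]
          by_contra hcon
          push Not at hcon
          apply hall
          rw [List.length_filter_eq_length_iff]
          intro c hc
          have := hcon c hc
          simpa using this
        rw [if_neg hall]
        cases hR : calls.any (fun c => REGISTER_CALLS.contains (PySem.Str.lower c)) with
        | true => rfl
        | false =>
          simp only [Bool.false_eq_true, if_false]
          rw [if_pos hne]
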